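-- pv_equiv track=rewrite | github.com/JoaoFilho33/Program_internet_1 | buscador/main.py | busca_termo
-- ===== SOURCE A (Python) =====
-- def busca_termo(key, text):
--     array = []
--
--     for i in range(len(text)):
--         if text[i:i+len(key)] == key:
--             inicio = max(0, i - 15)
--             fim = min(len(text), i+len(key) + 15)
--             contexto = text[inicio:fim]
--             array.append(contexto)
--
--     return array
-- ===== SOURCE B (Python) =====
-- def busca_termo(key, text):
--     array = []
--     i = text.find(key)
--     while i != -1:
--         array.append(text[max(0, i - 15):i + len(key) + 15])
--         i = text.find(key, i + 1)
--     return array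
-- ===== Notes on version B (the rewrite author's own statement) =====
-- stated objective: faster
-- what changed: Instead of scanning every index and comparing a fresh slice against the key, B hops from occurrence to occurrence with str.find(key, i+1), slicing a context only at each hit.
-- outside the precondition, e.g. on busca_termo('', 'ab'): A returns ['ab', 'ab'], B returns ['ab', 'ab', 'ab']
import Mathlib
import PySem

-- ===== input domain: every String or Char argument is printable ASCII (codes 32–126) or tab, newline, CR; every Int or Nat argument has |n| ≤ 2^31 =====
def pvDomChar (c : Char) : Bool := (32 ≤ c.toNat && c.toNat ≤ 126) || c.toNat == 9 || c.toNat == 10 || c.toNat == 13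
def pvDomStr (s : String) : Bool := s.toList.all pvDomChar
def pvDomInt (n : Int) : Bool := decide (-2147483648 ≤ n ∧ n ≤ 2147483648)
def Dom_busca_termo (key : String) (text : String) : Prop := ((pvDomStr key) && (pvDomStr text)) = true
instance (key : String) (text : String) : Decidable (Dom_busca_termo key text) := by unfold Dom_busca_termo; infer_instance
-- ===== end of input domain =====

-- B replaces A's per-index slice comparison with a find-stepping loop over occurrences (objective: faster, constant-factor).


-- ===== PORT A =====
def busca_termo (key : String) (text : String) : List String :=
  ((PySem.List.pyRange 0 (text.toList.length : Int)).foldl (fun arr i =>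
      if PySem.List.slice text.toList (some i) (some (i + (key.toList.length : Int))) == key.toList then
        arr ++ [PySem.List.slice text.toList (some (max 0 (i - 15)))
                  (some (min (text.toList.length : Int) (i + (key.toList.length : Int) + 15)))]
      else arr) []).map (fun cs => String.mk cs)

-- ===== PORT B =====
-- loop 'while i != -1': fuel t.length + 1 bounds the iteration count (i strictly increases, stays ≤ len)
def buscaAltGo (k t : List Char) : Nat → Int → List (List Char)
  | 0, _ => []
  | fuel+1, i =>
      if i = -1 then []
      else PySem.List.slice t (some (max 0 (i - 15))) (some (i + (k.length : Int) + 15)) ::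
           buscaAltGo k t fuel (PySem.Chars.findFrom t k (i + 1))

def busca_termo_alt (key : String) (text : String) : List String :=
  (buscaAltGo key.toList text.toList (text.toList.length + 1)
      (PySem.Chars.find text.toList key.toList)).map (fun cs => String.mk cs)

-- ===== PRECONDITION & SPEC =====
-- Pre_ excludes only the empty key, an unspecified corner where both answers are accidental: A's index
-- loop yields one context per position 0..len-1 while B's find loop also sees the match at len(text).
def Pre_busca_termo (key : String) (text : String) : Prop := key ≠ ""
instance (key : String) (text : String) : Decidable (Pre_busca_termo key text) := by unfold Pre_busca_termo; infer_instance
def pvWitness_busca_termo : String × String := ("ab", "xabab")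

def Spec_busca_termo (key : String) (text : String) (out : List String) : Prop := out = busca_termo_alt key text
instance (key : String) (text : String) (out : List String) : Decidable (Spec_busca_termo key text out) := by unfold Spec_busca_termo; infer_instance

-- ===== CLAIM (what is proved, stated in full; the proofs are below) =====
def Claim_equal_busca_termo : Prop := ∀ (key : String) (text : String), Dom_busca_termo key text → Pre_busca_termo key text → Spec_busca_termo key text (busca_termo key text)

-- ===== LEMMAS AND PROOFS =====

-- A's min-clamped context slice equals B's unclamped one (slice clamps past-the-end itself).
lemma ctx_eq (t : List Char) (m j : Nat) :
    PySem.List.slice t (some (max 0 ((j:Int) - 15))) (some (min (t.length : Int) ((j:Int) + (m:Int) + 15)))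
      = PySem.List.slice t (some (max 0 ((j:Int) - 15))) (some ((j:Int) + (m:Int) + 15)) := by
  have h0 : (0:Int) ≤ max 0 ((j:Int) - 15) := le_max_left _ _
  have hb : (0:Int) ≤ (j:Int) + (m:Int) + 15 := by positivity
  rw [PySem.List.slice_toNat t h0 (le_min (Int.natCast_nonneg _) hb),
      PySem.List.slice_toNat t h0 hb]
  by_cases hle : (j:Int) + (m:Int) + 15 ≤ (t.length : Int)
  · rw [min_eq_right hle]
  · rw [not_le] at hle
    rw [min_eq_left (le_of_lt hle)]
    set a := (max 0 ((j:Int) - 15)).toNat with ha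
    have hlen : (t.drop a).length ≤ ((t.length:Int).toNat - a) := by
      simp [List.length_drop]
    have hlen2 : (t.drop a).length ≤ (((j:Int) + (m:Int) + 15).toNat - a) := by
      have : (t.length : Int).toNat ≤ ((j:Int) + (m:Int) + 15).toNat := Int.toNat_le_toNat (le_of_lt hle)
      simp only [List.length_drop]
      omega
    rw [List.take_of_length_le hlen, List.take_of_length_le hlen2]

-- A's match test at a natural index is the prefix test.
lemma pred_eq (k t : List Char) (j : Nat) :
    (PySem.List.slice t (some (j:Int)) (some ((j:Int) + (k.length:Int))) == k)
      = decide (k <+: t.drop j) := by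
  rw [PySem.List.slice_natCast_add]
  simp only [List.prefix_iff_eq_take]
  by_cases h : k = List.take k.length (List.drop j t)
  · rw [← h]; simp
  · have h2 : List.take k.length (List.drop j t) ≠ k := fun hc => h hc.symm
    rw [beq_eq_false_iff_ne.mpr h2, decide_eq_false h]

-- one unfolding step of B's loop
lemma buscaAltGo_succ (k t : List Char) (fuel : Nat) (i : Int) :
    buscaAltGo k t (fuel+1) i =
      if i = -1 then []
      else PySem.List.slice t (some (max 0 (i - 15))) (some (i + (k.length : Int) + 15)) ::
           buscaAltGo k t fuel (PySem.Chars.findFrom t k (i + 1)) := rfl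

-- the predicate is false strictly below j0 => the filtered range may start at j0
lemma filter_range'_of_false (p : Nat → Bool) (n : Nat) :
    ∀ (d s : Nat), s + d ≤ n → (∀ x, s ≤ x → x < s + d → p x = false) →
    (List.range' s (n - s)).filter p = (List.range' (s + d) (n - (s + d))).filter p := by
  intro d
  induction d with
  | zero => intro s _ _; rfl
  | succ d ih =>
    intro s hs hf
    have hrange : List.range' s (n - s) = s :: List.range' (s+1) (n - (s+1)) := by
      have : n - s = (n - (s+1)) + 1 := by omega
      rw [this, List.range'_succ]
    rw [hrange, List.filter_cons, hf s le_rfl (by omega)]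
    rw [show s + (d+1) = (s+1) + d from by omega]
    exact ih (s+1) (by omega) (fun x hx hx' => hf x (by omega) (by omega))

-- Main invariant: the find chain starting at s produces the contexts of all match positions ≥ s.
lemma busca_chain (k t : List Char) (hk : k ≠ []) :
    ∀ (fuel s : Nat), s ≤ t.length → t.length + 1 - s ≤ fuel →
    buscaAltGo k t fuel (PySem.Chars.findFrom t k (s:Int)) =
      ((List.range' s (t.length - s)).filter (fun j => decide (k <+: t.drop j))).map
        (fun (j : Nat) => PySem.List.slice t (some (max 0 ((j:Int) - 15))) (some ((j:Int) + (k.length:Int) + 15))) := by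
  intro fuel
  induction fuel with
  | zero => intro s hs hf; omega
  | succ fuel ih =>
    intro s hs hf
    by_cases hi : PySem.Chars.findFrom t k (s:Int) = -1
    · rw [hi]
      have hno : ¬ k <:+: t.drop s := (PySem.Chars.findFrom_natCast_eq_neg_one_iff t k s hs).mp hi
      have hfil : (List.range' s (t.length - s)).filter (fun j => decide (k <+: t.drop j)) = [] := by
        rw [List.filter_eq_nil_iff]
        intro j hj
        simp only [decide_eq_true_eq]
        intro hpre
        have hsj : s ≤ j := (List.mem_range'_1.mp hj).1
        have hd : k <+: (t.drop s).drop (j - s) := by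
          rw [List.drop_drop, show s + (j - s) = j from by omega]
          exact hpre
        exact hno (by
          rw [← PySem.Chars.isIn_iff_infix]
          exact (PySem.Chars.exists_prefix_drop_iff_isIn k (t.drop s)).mp ⟨j - s, hd⟩)
      rw [hfil, buscaAltGo_succ, if_pos rfl]
      simp
    · obtain ⟨hle, hpre, hmin⟩ := PySem.Chars.findFrom_natCast_spec t k s hs hi
      set i := PySem.Chars.findFrom t k (s:Int) with hidef
      have hi0 : (0:Int) ≤ i := le_trans (Int.natCast_nonneg s) hle
      set j0 := i.toNat with hj0
      have hicast : i = (j0 : Int) := (Int.toNat_of_nonneg hi0).symm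
      have hsj0 : s ≤ j0 := by omega
      have hj0lt : j0 < t.length := by
        have h1 : k.length ≤ (t.drop j0).length := hpre.length_le
        have h2 : 0 < k.length := List.length_pos_iff.mpr hk
        simp only [List.length_drop] at h1
        omega
      rw [buscaAltGo_succ, if_neg hi]
      have hstep : i + 1 = ((j0 + 1 : Nat) : Int) := by rw [hicast]; push_cast; ring
      rw [hstep]
      rw [ih (j0 + 1) (by omega) (by omega)]
      rw [filter_range'_of_false _ t.length (j0 - s) s (by omega)
            (fun x hx hx' => by
              simp only [decide_eq_false_iff_not]
              exact hmin x hx (by omega))]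
      rw [show s + (j0 - s) = j0 from by omega]
      have hrange : List.range' j0 (t.length - j0) = j0 :: List.range' (j0+1) (t.length - (j0+1)) := by
        have : t.length - j0 = (t.length - (j0+1)) + 1 := by omega
        rw [this, List.range'_succ]
      rw [hrange, List.filter_cons, if_pos (decide_eq_true hpre), List.map_cons, hicast]

lemma busca_eq (key text : String) (hk : key ≠ "") :
    busca_termo key text = busca_termo_alt key text := by
  have hkl : key.toList ≠ [] := by
    intro hl; apply hk; exact String.toList_inj.mp (by simp [hl])
  unfold busca_termo busca_termo_alt
  rw [PySem.List.foldl_append_if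
        (fun i => PySem.List.slice text.toList (some i) (some (i + (key.toList.length : Int))) == key.toList)
        (fun i => PySem.List.slice text.toList (some (max 0 (i - 15)))
          (some (min (text.toList.length : Int) (i + (key.toList.length : Int) + 15)))) _ []]
  rw [show PySem.Chars.find text.toList key.toList
        = PySem.Chars.findFrom text.toList key.toList ((0:Nat):Int) from by
        simp [PySem.Chars.findFrom_zero]]
  rw [busca_chain key.toList text.toList hkl (text.toList.length + 1) 0 (Nat.zero_le _) (by omega)]
  rw [PySem.List.pyRange_zero_natCast, List.filter_map, List.map_map, List.map_map, List.nil_append,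
      List.map_map, Nat.sub_zero, ← List.range_eq_range']
  have hP : ((fun i => PySem.List.slice text.toList (some i) (some (i + (key.toList.length : Int))) == key.toList)
        ∘ fun (k : Nat) => (k : Int))
      = (fun (j : Nat) => decide (key.toList <+: text.toList.drop j)) := by
    funext j
    simp only [Function.comp_apply]
    exact pred_eq key.toList text.toList j
  have hF : ((fun cs => String.mk cs)
        ∘ (fun i => PySem.List.slice text.toList (some (max 0 (i - 15)))
            (some (min (text.toList.length : Int) (i + (key.toList.length : Int) + 15))))
        ∘ fun (k : Nat) => (k : Int))
      = ((fun cs => String.mk cs)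
        ∘ fun (j : Nat) => PySem.List.slice text.toList (some (max 0 ((j:Int) - 15)))
            (some ((j:Int) + (key.toList.length : Int) + 15))) := by
    funext j
    simp only [Function.comp_apply]
    rw [ctx_eq]
  rw [hP, hF]

-- ===== VERDICT (by name: the statement is the Claim_ definition above) =====
theorem busca_termo_spec : Claim_equal_busca_termo := by
  intro key text _ hpre
  unfold Spec_busca_termo
  exact busca_eq key text hpre
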